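/- GENERATED by tools/mkcompositions.py from design/units.gif.tsv (unit `DGifGetExtensionNext.COMPOSITION`) — do not edit.
   THE PROOF of the composition unit `DGifGetExtensionNext.COMPOSITION`: the 4 segments of `DGifGetExtensionNext` chain into its contract, by the theorem
   `Gif.Spec.DGifGetExtensionNext.compose` (proved next to the cut assertions). -/
import Gif.Spec.Units.DGifGetExtensionNext_COMPOSITION

/-- The segments of `DGifGetExtensionNext` compose into its contract. -/
theorem Gif.Spec.Proved.DGifGetExtensionNext_COMPOSITION_ok : Gif.Spec.DGifGetExtensionNext_COMPOSITION.Statement := by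
  intro Lay _hLay μ _hμ u₀ h_DGifGetExtensionNext_P h_DGifGetExtensionNext_1 h_DGifGetExtensionNext_2 h_DGifGetExtensionNext_E
  apply Gif.Spec.DGifGetExtensionNext.compose
  all_goals assumption
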